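-- pv_equiv track=rewrite | github.com/gary149/hf-inference-enrich | discover_provider_mapping.py | build_hf_to_or_mapping
-- ===== SOURCE A (Python) =====
-- from typing import Dict, Set, List
--
-- def build_hf_to_or_mapping(openrouter_models: List[Dict]) -> Dict[str, str]:
--     """Build a mapping from HuggingFace ID to OpenRouter ID (preferring non-free versions)"""
--     mapping = {}
--
--     for model in openrouter_models:
--         hf_id = model.get("hugging_face_id", "")
--         if hf_id:
--             # If we haven't seen this HF ID yet, or if this is a non-free version
--             if hf_id not in mapping or not model["id"].endswith(":free"):
--                 # Remove version suffixes like -07-25 to get base model ID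
--                 base_id = model["id"]
--                 if ":free" in base_id:
--                     base_id = base_id.replace(":free", "")
--                 # Remove date suffixes
--                 parts = base_id.split("-")
--                 if len(parts) >= 3 and parts[-2].isdigit() and parts[-1].isdigit():
--                     base_id = "-".join(parts[:-2])
--
--                 mapping[hf_id] = base_id
--
--     return mapping
-- ===== SOURCE B (Python) =====
-- from typing import Dict, List
--
--
-- def _norm(model_id: str) -> str:
--     """Strip ':free' and a trailing two-part numeric date suffix."""
--     base = model_id.replace(":free", "")
--     parts = base.split("-")
--     if len(parts) >= 3 and parts[-2].isdigit() and parts[-1].isdigit():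
--         base = "-".join(parts[:-2])
--     return base
--
--
-- def build_hf_to_or_mapping(openrouter_models: List[Dict]) -> Dict[str, str]:
--     """Build a mapping from HuggingFace ID to OpenRouter ID (preferring non-free versions)"""
--     # Aggregate pass: for each HF id (in first-occurrence order) remember the
--     # last non-free raw id and the first free raw id seen for it.
--     info = {}
--     for model in openrouter_models:
--         hf_id = model.get("hugging_face_id", "")
--         if hf_id:
--             model_id = model["id"]
--             nonfree, free = info.get(hf_id, (None, None))
--             if model_id.endswith(":free"):
--                 if free is None:
--                     free = model_id
--             else:
--                 nonfree = model_id
--             info[hf_id] = (nonfree, free)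
--     # Projection pass: prefer the non-free id, fall back to the first free one.
--     return {hf_id: _norm(nonfree if nonfree is not None else free)
--             for hf_id, (nonfree, free) in info.items()}
-- ===== Notes on version B (the rewrite author's own statement) =====
-- stated objective: alternative
-- what changed: Replaces A's conditional overwrite-with-normalized-value loop by an aggregate-then-project scheme: one pass records per HF id the last non-free and first free raw id, then a comprehension picks the preferred one and normalizes it once per key.
import Mathlib
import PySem

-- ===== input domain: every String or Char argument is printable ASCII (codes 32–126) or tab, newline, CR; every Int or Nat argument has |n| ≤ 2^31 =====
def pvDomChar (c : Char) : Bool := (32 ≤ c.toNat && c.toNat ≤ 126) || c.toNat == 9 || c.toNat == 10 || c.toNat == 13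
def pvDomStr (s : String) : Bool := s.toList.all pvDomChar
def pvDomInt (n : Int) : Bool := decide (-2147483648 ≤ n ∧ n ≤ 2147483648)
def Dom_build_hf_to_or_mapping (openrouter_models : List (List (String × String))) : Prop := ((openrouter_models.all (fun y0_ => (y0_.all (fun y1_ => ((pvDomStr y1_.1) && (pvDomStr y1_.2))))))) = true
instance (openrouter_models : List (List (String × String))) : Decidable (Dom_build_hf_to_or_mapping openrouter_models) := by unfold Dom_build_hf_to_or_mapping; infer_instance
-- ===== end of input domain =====

-- B replaces A's conditional overwrite-with-normalized-value loop by an aggregate pass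
-- (recording per HF id the last non-free and first free raw id) followed by a projection
-- pass; equivalence is proved on inputs where every model with a non-empty
-- hugging_face_id has an "id" key (elsewhere Python A raises KeyError).

-- ===== PORT A =====
-- loop body of A's single for-loop (named so the proofs can speak about it)
def pvLoopA (mapping : PySem.Dict String String) (model : List (String × String)) : PySem.Dict String String :=
  let d := PySem.Dict.ofList model
  let hf_id := d.getD "hugging_face_id" ""
  if hf_id ≠ "" then
    if mapping.contains hf_id = false ∨ PySem.Str.endswith (d.getD "id" "") ":free" = false then
      let base_id := d.getD "id" ""
      let base_id := if PySem.Str.isIn ":free" base_id then PySem.Str.replace base_id ":free" "" else base_id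
      let parts := (PySem.Str.split? base_id "-").getD []
      let base_id := if 3 ≤ parts.length ∧ PySem.Str.strIsdigit (PySem.List.pyGetD parts (-2) "") = true ∧ PySem.Str.strIsdigit (PySem.List.pyGetD parts (-1) "") = true
                     then PySem.Str.join "-" (PySem.List.slice parts none (some (-2))) else base_id
      mapping.insert hf_id base_id
    else mapping
  else mapping

def build_hf_to_or_mapping (openrouter_models : List (List (String × String))) : List (String × String) :=
  (openrouter_models.foldl pvLoopA PySem.Dict.empty).items

-- ===== PORT B =====
-- Source B's _norm: strip ':free', then a trailing two-part numeric date suffix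
def pvNorm (model_id : String) : String :=
  let base := PySem.Str.replace model_id ":free" ""
  let parts := (PySem.Str.split? base "-").getD []
  if 3 ≤ parts.length ∧ PySem.Str.strIsdigit (PySem.List.pyGetD parts (-2) "") = true ∧ PySem.Str.strIsdigit (PySem.List.pyGetD parts (-1) "") = true
  then PySem.Str.join "-" (PySem.List.slice parts none (some (-2))) else base

-- loop body of Source B's aggregate pass
def pvLoopB (info : PySem.Dict String (Option String × Option String)) (model : List (String × String)) :
    PySem.Dict String (Option String × Option String) :=
  let d := PySem.Dict.ofList model
  let hf_id := d.getD "hugging_face_id" ""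
  if hf_id ≠ "" then
    let model_id := d.getD "id" ""
    let p := info.getD hf_id (none, none)
    let p' := if PySem.Str.endswith model_id ":free" then (p.1, if p.2 = none then some model_id else p.2)
              else (some model_id, p.2)
    info.insert hf_id p'
  else info
def build_hf_to_or_mapping_alt (openrouter_models : List (List (String × String))) : List (String × String) :=
  let info := openrouter_models.foldl pvLoopB PySem.Dict.empty
  info.items.map (fun q => (q.1, pvNorm (q.2.1.getD (q.2.2.getD ""))))

-- ===== PRECONDITION & SPEC =====
-- Pre_ excludes exactly the inputs on which Python A (and B) raises KeyError: a model
-- whose "hugging_face_id" value is non-empty but which has no "id" key.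
def Pre_build_hf_to_or_mapping (openrouter_models : List (List (String × String))) : Prop :=
  ∀ model ∈ openrouter_models,
    (PySem.Dict.ofList model).getD "hugging_face_id" "" ≠ "" →
    (PySem.Dict.ofList model).contains "id" = true
instance (openrouter_models : List (List (String × String))) : Decidable (Pre_build_hf_to_or_mapping openrouter_models) := by unfold Pre_build_hf_to_or_mapping; infer_instance

def pvWitness_build_hf_to_or_mapping : (List (List (String × String))) :=
  [[("hugging_face_id", "h"), ("id", "m-01-02:free")], [("hugging_face_id", "h"), ("id", "m-pro")]]

def Spec_build_hf_to_or_mapping (openrouter_models : List (List (String × String))) (out : List (String × String)) : Prop := out = build_hf_to_or_mapping_alt openrouter_models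
instance (openrouter_models : List (List (String × String))) (out : List (String × String)) : Decidable (Spec_build_hf_to_or_mapping openrouter_models out) := by unfold Spec_build_hf_to_or_mapping; infer_instance

-- ===== CLAIM (what is proved, stated in full; the proofs are below) =====
def Claim_equal_build_hf_to_or_mapping : Prop := ∀ (openrouter_models : List (List (String × String))), Dom_build_hf_to_or_mapping openrouter_models → Pre_build_hf_to_or_mapping openrouter_models → Spec_build_hf_to_or_mapping openrouter_models (build_hf_to_or_mapping openrouter_models)

-- ===== LEMMAS AND PROOFS =====

-- the value Source B's projection pass reads out of an aggregate pair
def pvProj (p : Option String × Option String) : String := p.1.getD (p.2.getD "")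
def pvF (q : String × (Option String × Option String)) : String × String := (q.1, pvNorm (pvProj q.2))
def pvInv (m : PySem.Dict String String) (info : PySem.Dict String (Option String × Option String)) : Prop :=
  m.items = info.items.map pvF ∧ (∀ q ∈ info.items, q.2.1 = none → q.2.2 ≠ none) ∧ info.keys.Nodup


lemma pvReplaceGo_of_not_infix (o new : List Char) :
    ∀ (fuel : Nat) (l acc : List Char), ¬ o <:+: l →
      PySem.Chars.replace.go o new fuel l acc = acc.reverse ++ l := by
  intro fuel
  induction fuel with
  | zero => intro l acc _; simp [PySem.Chars.replace.go]
  | succ n ih =>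
    intro l acc hinf
    cases l with
    | nil => simp [PySem.Chars.replace.go]
    | cons c t =>
      have hpre : o.isPrefixOf (c :: t) = false := by
        by_contra h
        exact hinf (List.IsPrefix.isInfix (List.isPrefixOf_iff_prefix.mp (by simpa using h)))
      have ht : ¬ o <:+: t := fun h => hinf (h.trans (List.suffix_cons c t).isInfix)
      simp [PySem.Chars.replace.go, hpre, ih t (c :: acc) ht]

lemma pvReplaceChars_self (cs : List Char) (h : PySem.Chars.isIn ":free".toList cs = false) :
    PySem.Chars.replace cs ":free".toList [] = cs := by
  have hinf : ¬ (":free".toList <:+: cs) := by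
    intro hh
    rw [← PySem.Chars.isIn_iff_infix, h] at hh
    exact Bool.false_ne_true hh
  rw [PySem.Chars.replace]
  rw [if_neg (by decide)]
  rw [pvReplaceGo_of_not_infix _ _ _ _ _ hinf]
  simp

lemma pvReplace_self (s : String) (h : PySem.Str.isIn ":free" s = false) :
    PySem.Str.replace s ":free" "" = s := by
  show String.ofList (PySem.Chars.replace s.toList ":free".toList "".toList) = s
  rw [show ("" : String).toList = [] from rfl]
  rw [pvReplaceChars_self s.toList (by simpa using h)]
  simp

lemma pvNormA_insert_eq (m : PySem.Dict String String) (k s : String) :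
    (let base_id := if PySem.Str.isIn ":free" s then PySem.Str.replace s ":free" "" else s
     let parts := (PySem.Str.split? base_id "-").getD []
     let base_id := if 3 ≤ parts.length ∧ PySem.Str.strIsdigit (PySem.List.pyGetD parts (-2) "") = true ∧ PySem.Str.strIsdigit (PySem.List.pyGetD parts (-1) "") = true
                    then PySem.Str.join "-" (PySem.List.slice parts none (some (-2))) else base_id
     m.insert k base_id) = m.insert k (pvNorm s) := by
  by_cases hi : PySem.Str.isIn ":free" s = true
  · rw [pvNorm]; rw [if_pos hi]
  · have hi' : PySem.Str.isIn ":free" s = false := by rwa [Bool.not_eq_true] at hi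
    rw [pvNorm]; rw [if_neg hi, pvReplace_self s hi']

-- branch equations for the two loop bodies
set_option maxHeartbeats 2000000 in
lemma pvLoopA_update (m : PySem.Dict String String) (model : List (String × String))
    (h : (PySem.Dict.ofList model).getD "hugging_face_id" "" ≠ "")
    (hcond : m.contains ((PySem.Dict.ofList model).getD "hugging_face_id" "") = false ∨
             PySem.Str.endswith ((PySem.Dict.ofList model).getD "id" "") ":free" = false) :
    pvLoopA m model = m.insert ((PySem.Dict.ofList model).getD "hugging_face_id" "")
      (pvNorm ((PySem.Dict.ofList model).getD "id" "")) := by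
  unfold pvLoopA
  rw [if_pos h, if_pos hcond]
  exact pvNormA_insert_eq m ((PySem.Dict.ofList model).getD "hugging_face_id" "") ((PySem.Dict.ofList model).getD "id" "")

lemma pvLoopA_skip (m : PySem.Dict String String) (model : List (String × String))
    (h : (PySem.Dict.ofList model).getD "hugging_face_id" "" ≠ "")
    (hcond : ¬ (m.contains ((PySem.Dict.ofList model).getD "hugging_face_id" "") = false ∨
             PySem.Str.endswith ((PySem.Dict.ofList model).getD "id" "") ":free" = false)) :
    pvLoopA m model = m := by
  unfold pvLoopA
  rw [if_pos h, if_neg hcond]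

lemma pvLoopB_update (info : PySem.Dict String (Option String × Option String))
    (model : List (String × String))
    (h : (PySem.Dict.ofList model).getD "hugging_face_id" "" ≠ "") :
    pvLoopB info model = info.insert ((PySem.Dict.ofList model).getD "hugging_face_id" "")
      (if PySem.Str.endswith ((PySem.Dict.ofList model).getD "id" "") ":free" then
        ((info.getD ((PySem.Dict.ofList model).getD "hugging_face_id" "") (none, none)).1,
         if (info.getD ((PySem.Dict.ofList model).getD "hugging_face_id" "") (none, none)).2 = none
         then some ((PySem.Dict.ofList model).getD "id" "")
         else (info.getD ((PySem.Dict.ofList model).getD "hugging_face_id" "") (none, none)).2)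
       else (some ((PySem.Dict.ofList model).getD "id" ""),
             (info.getD ((PySem.Dict.ofList model).getD "hugging_face_id" "") (none, none)).2)) := by
  unfold pvLoopB
  rw [if_pos h]

lemma pvLoopA_nohf (m : PySem.Dict String String) (model : List (String × String))
    (h : ¬ (PySem.Dict.ofList model).getD "hugging_face_id" "" ≠ "") : pvLoopA m model = m := by
  unfold pvLoopA; rw [if_neg h]

lemma pvLoopB_nohf (info : PySem.Dict String (Option String × Option String))
    (model : List (String × String))
    (h : ¬ (PySem.Dict.ofList model).getD "hugging_face_id" "" ≠ "") : pvLoopB info model = info := by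
  unfold pvLoopB; rw [if_neg h]

lemma pvInv_step (model : List (String × String)) (m : PySem.Dict String String)
    (info : PySem.Dict String (Option String × Option String)) (h : pvInv m info) :
    pvInv (pvLoopA m model) (pvLoopB info model) := by
  obtain ⟨h1, h2, h3⟩ := h
  have hkeys : m.keys = info.keys := by
    show m.items.map Prod.fst = info.items.map Prod.fst
    rw [h1, List.map_map]; rfl
  have hcont : ∀ k, m.contains k = info.contains k := by
    intro k
    rw [PySem.Dict.contains_eq_decide_mem_keys, PySem.Dict.contains_eq_decide_mem_keys, hkeys]
  by_cases hhf : (PySem.Dict.ofList model).getD "hugging_face_id" "" ≠ ""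
  case neg => rw [pvLoopA_nohf m model hhf, pvLoopB_nohf info model hhf]; exact ⟨h1, h2, h3⟩
  case pos =>
  rw [pvLoopB_update info model hhf]
  set hf := (PySem.Dict.ofList model).getD "hugging_face_id" "" with hhfdef
  set mid := (PySem.Dict.ofList model).getD "id" "" with hmiddef
  by_cases hc : info.contains hf = true
  case neg =>
    -- first time this hf id is seen: both sides append a fresh entry
    have hc' : info.contains hf = false := by rwa [Bool.not_eq_true] at hc
    have hmc : m.contains hf = false := by rw [hcont]; exact hc'
    rw [pvLoopA_update m model hhf (Or.inl hmc)]
    rw [PySem.Dict.getD_of_not_contains _ _ hc']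
    refine ⟨?_, ?_, PySem.Dict.nodup_keys_insert _ _ _ h3⟩
    · rw [PySem.Dict.items_insert_of_not_contains _ _ hmc,
          PySem.Dict.items_insert_of_not_contains _ _ hc', List.map_append, h1]
      by_cases es : PySem.Str.endswith mid ":free" = true
      · rw [if_pos es]; rfl
      · rw [if_neg es]; rfl
    · intro q hq hq1
      rw [PySem.Dict.items_insert_of_not_contains _ _ hc'] at hq
      rcases List.mem_append.mp hq with hq | hq
      · exact h2 q hq hq1
      · simp only [List.mem_singleton] at hq
        subst hq
        by_cases es : PySem.Str.endswith mid ":free" = true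
        · rw [if_pos es] at hq1 ⊢; simp
        · rw [if_neg es] at hq1; simp at hq1
  case pos =>
    have hmc : m.contains hf = true := by rw [hcont]; exact hc
    obtain ⟨p0, hp0⟩ : ∃ p0, info.get? hf = some p0 := by
      have := PySem.Dict.contains_eq_isSome_get? info hf
      rw [hc] at this
      exact Option.isSome_iff_exists.mp this.symm
    have hgd : info.getD hf (none, none) = p0 := PySem.Dict.getD_of_get?_eq_some _ _ hp0
    have hmem : (hf, p0) ∈ info.items := PySem.Dict.mem_items_of_get?_eq_some _ hp0
    rw [hgd]
    have hval : ∀ q ∈ info.items, q.1 = hf → q.2 = p0 := by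
      intro q hq hq1
      have := PySem.Dict.get?_of_mem_items (d := info) (k := q.1) (v := q.2) (by simpa using hq) h3
      rw [hq1, hp0] at this
      exact (Option.some_inj.mp this).symm
    by_cases es : PySem.Str.endswith mid ":free" = true
    case pos =>
      -- free version of an already-seen hf id: A keeps its entry, B's projection is unchanged
      rw [pvLoopA_skip m model hhf (by rw [not_or, ← hhfdef, ← hmiddef]; exact ⟨by simp [hmc], by simp; simpa using es⟩)]
      rw [if_pos es]
      have hproj : pvProj (p0.1, if p0.2 = none then some mid else p0.2) = pvProj p0 := by
        rcases hn1 : p0.1 with _ | x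
        · have hn2 := h2 (hf, p0) hmem hn1
          rcases hn2' : p0.2 with _ | y
          · exact absurd hn2' hn2
          · simp [pvProj, hn1, hn2']
        · simp [pvProj, hn1]
      refine ⟨?_, ?_, PySem.Dict.nodup_keys_insert _ _ _ h3⟩
      · rw [PySem.Dict.items_insert_of_contains _ _ hc, List.map_map, h1]
        refine (List.map_congr_left ?_).symm
        intro q hq
        by_cases hqh : (q.1 == hf) = true
        · have hq0 : q = (hf, p0) := by
            have h1' := eq_of_beq hqh
            have := hval q hq h1'
            cases q; simp_all
          subst hq0
          simp only [Function.comp_apply, if_pos hqh]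
          show pvF (hf, _) = pvF (hf, p0)
          simp [pvF, hproj]
        · simp [Function.comp, hqh]
      · intro q hq hq1
        rw [PySem.Dict.items_insert_of_contains _ _ hc] at hq
        obtain ⟨r, hr, hrq⟩ := List.mem_map.mp hq
        by_cases hrh : (r.1 == hf) = true
        · rw [if_pos hrh] at hrq
          subst hrq
          simp only at hq1 ⊢
          have hn2 := h2 (hf, p0) hmem hq1
          rcases hy : p0.2 with _ | y
          · exact absurd hy hn2
          · simp

        · rw [if_neg hrh] at hrq
          subst hrq
          exact h2 r hr hq1
    case neg =>
      -- non-free version: both sides overwrite the entry for hf in place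
      have es' : PySem.Str.endswith mid ":free" = false := by rwa [Bool.not_eq_true] at es
      rw [pvLoopA_update m model hhf (Or.inr es')]
      rw [if_neg es]
      refine ⟨?_, ?_, PySem.Dict.nodup_keys_insert _ _ _ h3⟩
      · rw [PySem.Dict.items_insert_of_contains _ _ hmc,
            PySem.Dict.items_insert_of_contains _ _ hc, h1, List.map_map, List.map_map]
        refine List.map_congr_left ?_
        intro q hq
        by_cases hqh : (q.1 == hf) = true
        · simp only [Function.comp_apply, pvF, if_pos hqh]
          simp only [pvProj]
          rfl
        · simp [Function.comp, pvF, hqh]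
      · intro q hq hq1
        rw [PySem.Dict.items_insert_of_contains _ _ hc] at hq
        obtain ⟨r, hr, hrq⟩ := List.mem_map.mp hq
        by_cases hrh : (r.1 == hf) = true
        · rw [if_pos hrh] at hrq; subst hrq; simp at hq1
        · rw [if_neg hrh] at hrq; subst hrq; exact h2 r hr hq1

lemma pvInv_fold (models : List (List (String × String))) :
    ∀ (m : PySem.Dict String String) (info : PySem.Dict String (Option String × Option String)),
      pvInv m info → pvInv (models.foldl pvLoopA m) (models.foldl pvLoopB info) := by
  induction models with
  | nil => intro m info h; simpa using h
  | cons x xs ih => intro m info h; exact ih _ _ (pvInv_step x m info h)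

-- ===== VERDICT (by name: the statement is the Claim_ definition above) =====
theorem build_hf_to_or_mapping_spec : Claim_equal_build_hf_to_or_mapping := by
  intro models _ _
  have h := pvInv_fold models PySem.Dict.empty PySem.Dict.empty
    ⟨rfl, by intro q hq; exact absurd hq (List.not_mem_nil), PySem.Dict.nodup_keys_empty⟩
  show build_hf_to_or_mapping models = build_hf_to_or_mapping_alt models
  unfold build_hf_to_or_mapping build_hf_to_or_mapping_alt
  rw [h.1]
  rfl
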